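-- pv_equiv track=rewrite | github.com/mpetteno/aoc | editions/2024/day2/solution.py | get_lds
-- ===== SOURCE A (Python) =====
-- def get_lds(sequence):
--     n = len(sequence)
--     dp = [1] * n
--     for i in range(1, n):
--         for j in range(i):
--             abs_distance = abs(int(sequence[i]) - int(sequence[j]))
--             if int(sequence[j]) > int(sequence[i]) and 1 <= abs_distance <= 3:
--                 dp[i] = max(dp[i], dp[j] + 1)
--     return max(dp)
-- ===== SOURCE B (Python) =====
-- def get_lds(sequence):
--     best = {}  # value -> best chain length ending at that value
--     ans = 0
--     for v in sequence:
--         d = 1 + max(best.get(v + 1, 0), best.get(v + 2, 0), best.get(v + 3, 0))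
--         best[v] = max(best.get(v, 0), d)
--         ans = max(ans, d)
--     return ans
-- ===== Notes on version B (the rewrite author's own statement) =====
-- stated objective: faster
-- what changed: Replaced the O(n^2) all-pairs DP with a single pass keeping, in a dict, the best chain length ending at each value, so each element queries only the 3 relevant predecessor values (v+1, v+2, v+3).
import Mathlib
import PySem

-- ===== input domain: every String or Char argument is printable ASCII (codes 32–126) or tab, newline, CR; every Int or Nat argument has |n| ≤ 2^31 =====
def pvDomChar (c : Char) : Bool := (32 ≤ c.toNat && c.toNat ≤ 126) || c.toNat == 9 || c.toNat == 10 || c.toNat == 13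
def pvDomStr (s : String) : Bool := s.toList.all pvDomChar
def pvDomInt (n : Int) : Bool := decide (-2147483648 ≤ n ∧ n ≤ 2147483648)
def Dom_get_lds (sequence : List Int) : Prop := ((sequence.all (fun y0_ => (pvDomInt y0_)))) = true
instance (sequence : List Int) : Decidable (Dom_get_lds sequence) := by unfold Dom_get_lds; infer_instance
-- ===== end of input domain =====

-- B replaces A's O(n^2) all-pairs DP by a single pass that keeps, in a dict, the best chain
-- length ending at each value and queries only the 3 relevant predecessor values (faster, asymptotic).

-- ===== PORT A =====
-- All list indices below are the nonnegative in-range indices Python's loops produce, so plain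
-- Nat indexing with getD is exact; Python's max(dp) raises on an empty list (excluded by Pre_).
def get_lds (sequence : List Int) : Int :=
  let n := sequence.length
  let dp0 : List Int := List.replicate n 1
  let dp := ((List.range n).drop 1).foldl (fun dp i =>
      (List.range i).foldl (fun dp j =>
        let absd := (sequence.getD i 0 - sequence.getD j 0).natAbs
        if sequence.getD j 0 > sequence.getD i 0 ∧ 1 ≤ absd ∧ absd ≤ 3 then
          dp.set i (max (dp.getD i 0) (dp.getD j 0 + 1))
        else dp) dp) dp0
  (PySem.List.max? dp (fun x => x)).getD 0

-- ===== PORT B =====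
def get_lds_alt (sequence : List Int) : Int :=
  (sequence.foldl (fun (st : PySem.Dict Int Int × Int) v =>
      let best := st.1
      let d := 1 + max (best.getD (v + 1) 0) (max (best.getD (v + 2) 0) (best.getD (v + 3) 0))
      (best.insert v (max (best.getD v 0) d), max st.2 d))
    ((PySem.Dict.mk [] : PySem.Dict Int Int), (0 : Int))).2

-- ===== PRECONDITION & SPEC =====
-- Pre_ excludes only the empty list, on which A raises ValueError (max of an empty sequence).
def Pre_get_lds (sequence : List Int) : Prop := sequence ≠ []
instance (sequence : List Int) : Decidable (Pre_get_lds sequence) := by unfold Pre_get_lds; infer_instance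
def pvWitness_get_lds : List Int := ([7, 6, 4, 2, 1])

def Spec_get_lds (sequence : List Int) (out : Int) : Prop := out = get_lds_alt sequence
instance (sequence : List Int) (out : Int) : Decidable (Spec_get_lds sequence out) := by unfold Spec_get_lds; infer_instance

-- ===== CLAIM (what is proved, stated in full; the proofs are below) =====
def Claim_equal_get_lds : Prop := ∀ (sequence : List Int), Dom_get_lds sequence → Pre_get_lds sequence → Spec_get_lds sequence (get_lds sequence)

-- ===== LEMMAS AND PROOFS =====

-- value at index j
def sv (s : List Int) (j : ℕ) : Int := s.getD j 0

-- A's predecessor condition between position i (current) and j (candidate predecessor)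
abbrev lcond (s : List Int) (i j : ℕ) : Prop :=
  sv s j > sv s i ∧ 1 ≤ (sv s i - sv s j).natAbs ∧ (sv s i - sv s j).natAbs ≤ 3

-- the new dp value at position k, reading earlier dp values from l
def nvF (s : List Int) (k : ℕ) (l : List Int) : Int :=
  (List.range k).foldl (fun acc j => if lcond s k j then max acc (l.getD j 0 + 1) else acc) 1

-- the dp prefix list after the first k positions are finalised
def dpl (s : List Int) : ℕ → List Int
  | 0 => []
  | k + 1 => dpl s k ++ [nvF s k (dpl s k)]

-- the final dp value at position k
def Dv (s : List Int) (k : ℕ) : Int := nvF s k (dpl s k)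

lemma dpl_succ (s : List Int) (k : ℕ) : dpl s (k + 1) = dpl s k ++ [Dv s k] := rfl

lemma length_dpl (s : List Int) (k : ℕ) : (dpl s k).length = k := by
  induction k with
  | zero => rfl
  | succ k ih => simp [dpl_succ, ih]

lemma getD_append_cons (xs zs : List Int) (y : Int) : (xs ++ y :: zs).getD xs.length 0 = y := by
  induction xs with
  | nil => rfl
  | cons a t ih => simpa using ih

lemma set_append_cons (xs zs : List Int) (y v : Int) : (xs ++ y :: zs).set xs.length v = xs ++ v :: zs := by
  induction xs with
  | nil => rfl
  | cons a t ih => simpa using ih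

lemma dpl_getD (s : List Int) : ∀ (m j : ℕ), j < m → (dpl s m).getD j 0 = Dv s j := by
  intro m
  induction m with
  | zero => omega
  | succ m ih =>
    intro j hj
    rw [dpl_succ]
    rcases Nat.lt_or_ge j m with h | h
    · rw [List.getD, List.getElem?_append_left (by rw [length_dpl]; exact h)]
      exact ih j h
    · have hjm : j = m := by omega
      subst hjm
      have h2 := getD_append_cons (dpl s j) [] (Dv s j)
      rw [length_dpl] at h2
      exact h2

lemma dv_eq (s : List Int) (k : ℕ) :
    Dv s k = (List.range k).foldl (fun acc j => if lcond s k j then max acc (Dv s j + 1) else acc) 1 := by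
  show nvF s k (dpl s k) = _
  unfold nvF
  apply List.foldl_ext
  intro a j hj
  rw [dpl_getD s k j (List.mem_range.mp hj)]

lemma foldl_mono (f : Int → ℕ → Int) (hf : ∀ a j, a ≤ f a j) :
    ∀ (l : List ℕ) (a : Int), a ≤ l.foldl f a := by
  intro l
  induction l with
  | nil => intro a; exact le_refl a
  | cons x t ih => intro a; exact le_trans (hf a x) (ih (f a x))

lemma dv_pos (s : List Int) (k : ℕ) : 1 ≤ Dv s k := by
  rw [dv_eq]
  exact foldl_mono _ (by intro a j; split <;> simp) _ _

-- A's inner loop writes only index i and reads finalised values at j < i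
lemma innerA (s : List Int) (i : ℕ) :
    ∀ (l : List ℕ) (dp : List Int), i < dp.length → (∀ j ∈ l, j < i) →
      (∀ j, j < i → dp.getD j 0 = Dv s j) →
      l.foldl (fun dp j => if lcond s i j then dp.set i (max (dp.getD i 0) (dp.getD j 0 + 1)) else dp) dp
      = dp.set i (l.foldl (fun acc j => if lcond s i j then max acc (Dv s j + 1) else acc) (dp.getD i 0)) := by
  intro l
  induction l with
  | nil =>
    intro dp hlen _ _
    simp only [List.foldl_nil]
    rw [List.getD_eq_getElem dp 0 hlen, List.set_getElem_self]
  | cons x t ih =>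
    intro dp hlen hmem hfin
    have hxi : x < i := hmem x List.mem_cons_self
    simp only [List.foldl_cons]
    by_cases hc : lcond s i x
    · rw [if_pos hc, if_pos hc]
      set dp' := dp.set i (max (dp.getD i 0) (dp.getD x 0 + 1)) with hdp'
      have hlen' : i < dp'.length := by simpa [hdp'] using hlen
      have hfin' : ∀ j, j < i → dp'.getD j 0 = Dv s j := by
        intro j hj
        rw [hdp', List.getD, List.getElem?_set_ne (by omega : i ≠ j), ← List.getD]
        exact hfin j hj
      rw [ih dp' hlen' (fun j hj => hmem j (List.mem_cons_of_mem _ hj)) hfin']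
      have hget' : dp'.getD i 0 = max (dp.getD i 0) (dp.getD x 0 + 1) := by
        rw [hdp', List.getD, List.getElem?_set_self (by simpa using hlen)]
        rfl
      rw [hget', hdp', List.set_set, hfin x hxi]
    · rw [if_neg hc, if_neg hc]
      exact ih dp hlen (fun j hj => hmem j (List.mem_cons_of_mem _ hj)) hfin

-- A's outer loop maintains the finalised prefix
lemma stageA (s : List Int) :
    ∀ (m : ℕ), m + 1 ≤ s.length →
      (List.range' 1 m).foldl (fun dp i =>
        (List.range i).foldl (fun dp j =>
          if lcond s i j then dp.set i (max (dp.getD i 0) (dp.getD j 0 + 1)) else dp) dp)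
        (List.replicate s.length 1)
      = dpl s (m + 1) ++ List.replicate (s.length - (m + 1)) 1 := by
  intro m
  induction m with
  | zero =>
    intro h1
    simp only [List.range'_zero, List.foldl_nil]
    have : dpl s 1 = [(1 : Int)] := rfl
    rw [this]
    obtain ⟨n', hn⟩ : ∃ n', s.length = n' + 1 := ⟨s.length - 1, by omega⟩
    rw [hn]
    simp [List.replicate_succ]
  | succ m ih =>
    intro h2
    have h1 : m + 1 ≤ s.length := by omega
    have hconc : List.range' 1 (m + 1) = List.range' 1 m ++ [1 + m] := by
      simpa using (List.range'_concat : List.range' 1 (m+1) 1 = _)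
    rw [hconc, List.foldl_append, ih h1]
    simp only [List.foldl_cons, List.foldl_nil]
    have h1m : 1 + m = m + 1 := by omega
    rw [h1m]
    -- the dp list entering iteration i = m+1
    obtain ⟨r, hr⟩ : ∃ r, s.length - (m + 1) = r + 1 := ⟨s.length - (m + 2), by omega⟩
    rw [hr, List.replicate_succ]
    set dp : List Int := dpl s (m + 1) ++ (1 : Int) :: List.replicate r 1 with hdp
    have hlendpl : (dpl s (m + 1)).length = m + 1 := length_dpl s (m + 1)
    have hlen : m + 1 < dp.length := by
      rw [hdp]; simp [hlendpl]
    have hfin : ∀ j, j < m + 1 → dp.getD j 0 = Dv s j := by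
      intro j hj
      rw [hdp, List.getD, List.getElem?_append_left (by rw [hlendpl]; exact hj), ← List.getD]
      exact dpl_getD s (m + 1) j hj
    rw [innerA s (m + 1) (List.range (m + 1)) dp hlen (fun j hj => List.mem_range.mp hj) hfin]
    have hgetI : dp.getD (m + 1) 0 = 1 := by
      have := getD_append_cons (dpl s (m + 1)) (List.replicate r 1) 1
      rw [hlendpl] at this
      rw [hdp]; exact this
    rw [hgetI]
    have hset := set_append_cons (dpl s (m + 1)) (List.replicate r 1) 1
        ((List.range (m + 1)).foldl (fun acc j => if lcond s (m + 1) j then max acc (Dv s j + 1) else acc) 1)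
    rw [hlendpl] at hset
    rw [hdp, hset, ← dv_eq s (m + 1)]
    have : s.length - (m + 1 + 1) = r := by omega
    rw [this]
    simp [dpl_succ]

lemma dpl_eq_map (s : List Int) (k : ℕ) : dpl s k = (List.range k).map (Dv s) := by
  induction k with
  | zero => rfl
  | succ k ih => rw [dpl_succ, ih, List.range_succ, List.map_append]; rfl

lemma getLdsA (s : List Int) (h : s ≠ []) :
    get_lds s = (PySem.List.max? (dpl s s.length) (fun x => x)).getD 0 := by
  obtain ⟨m, hm⟩ : ∃ m, s.length = m + 1 := by
    cases s with
    | nil => exact absurd rfl h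
    | cons a t => exact ⟨t.length, rfl⟩
  have hdrop : (List.range s.length).drop 1 = List.range' 1 m := by
    rw [hm, List.range_eq_range', List.range'_succ]; rfl
  have hst := stageA s m (by omega)
  have hrfl : get_lds s = (PySem.List.max? (((List.range s.length).drop 1).foldl (fun dp i =>
      (List.range i).foldl (fun dp j =>
        if lcond s i j then dp.set i (max (dp.getD i 0) (dp.getD j 0 + 1)) else dp) dp)
      (List.replicate s.length 1)) (fun x => x)).getD 0 := rfl
  rw [hrfl, hdrop, hst, hm]
  simp

-- best chain length ending at value w among the first k positions (0 if none)
def bS (s : List Int) (k : ℕ) (w : Int) : Int :=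
  (List.range k).foldl (fun acc j => if sv s j = w then max acc (Dv s j) else acc) 0

-- running answer after the first k positions
def aS (s : List Int) (k : ℕ) : Int :=
  (List.range k).foldl (fun acc j => max acc (Dv s j)) 0

lemma bS_succ (s : List Int) (k : ℕ) (w : Int) :
    bS s (k + 1) w = if sv s k = w then max (bS s k w) (Dv s k) else bS s k w := by
  simp [bS, List.range_succ]

lemma aS_succ (s : List Int) (k : ℕ) : aS s (k + 1) = max (aS s k) (Dv s k) := by
  simp [aS, List.range_succ]

-- the dict query of the 3 relevant values computes A's inner maximisation
lemma bucketAux (s : List Int) (v : Int) :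
    ∀ (k : ℕ),
      (List.range k).foldl (fun acc j =>
          if sv s j > v ∧ 1 ≤ (v - sv s j).natAbs ∧ (v - sv s j).natAbs ≤ 3 then max acc (Dv s j + 1) else acc) 1
      = 1 + max (bS s k (v + 1)) (max (bS s k (v + 2)) (bS s k (v + 3))) := by
  intro k
  induction k with
  | zero => simp [bS]
  | succ k ih =>
    rw [List.range_succ, List.foldl_append, List.foldl_cons, List.foldl_nil, ih,
        bS_succ, bS_succ, bS_succ]
    have hDv : 1 ≤ Dv s k := dv_pos s k
    split_ifs <;> omega

lemma bucket (s : List Int) (k : ℕ) :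
    Dv s k = 1 + max (bS s k (sv s k + 1)) (max (bS s k (sv s k + 2)) (bS s k (sv s k + 3))) := by
  rw [dv_eq]
  exact bucketAux s (sv s k) k

-- B's loop invariant
lemma stageB (s : List Int) :
    ∀ (k : ℕ), k ≤ s.length →
      (∀ w, ((s.take k).foldl (fun (st : PySem.Dict Int Int × Int) v =>
          let best := st.1
          let d := 1 + max (best.getD (v + 1) 0) (max (best.getD (v + 2) 0) (best.getD (v + 3) 0))
          (best.insert v (max (best.getD v 0) d), max st.2 d))
        ((PySem.Dict.mk [] : PySem.Dict Int Int), (0 : Int))).1.getD w 0 = bS s k w)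
      ∧ ((s.take k).foldl (fun (st : PySem.Dict Int Int × Int) v =>
          let best := st.1
          let d := 1 + max (best.getD (v + 1) 0) (max (best.getD (v + 2) 0) (best.getD (v + 3) 0))
          (best.insert v (max (best.getD v 0) d), max st.2 d))
        ((PySem.Dict.mk [] : PySem.Dict Int Int), (0 : Int))).2 = aS s k := by
  intro k
  induction k with
  | zero =>
    intro _
    constructor
    · intro w
      have he : (PySem.Dict.mk [] : PySem.Dict Int Int) = PySem.Dict.empty := rfl
      simp only [List.take_zero, List.foldl_nil, he, PySem.Dict.getD_empty]
      simp [bS]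
    · simp [aS]
  | succ k ih =>
    intro hk1
    have hk : k ≤ s.length := by omega
    have hklt : k < s.length := by omega
    obtain ⟨hbest, hans⟩ := ih hk
    have htake : s.take (k + 1) = s.take k ++ [s[k]] := by
      rw [List.take_add_one]; simp [List.getElem?_eq_getElem hklt]
    have hsv : sv s k = s[k] := by
      rw [sv, List.getD_eq_getElem s 0 hklt]
    have hd : (1 : Int) + max (bS s k (s[k] + 1)) (max (bS s k (s[k] + 2)) (bS s k (s[k] + 3)))
        = Dv s k := by
      rw [bucket s k, hsv]
    rw [htake, List.foldl_append, List.foldl_cons, List.foldl_nil]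
    constructor
    · intro w
      rw [PySem.Dict.getD_insert, bS_succ, hsv]
      by_cases hw : w = s[k]
      · rw [if_pos hw, if_pos hw.symm]
        simp only [hbest, hd, hw]
      · rw [if_neg hw, if_neg (fun h' => hw h'.symm)]
        exact hbest w
    · rw [aS_succ]
      simp only [hbest, hans, hd]

lemma getLdsB (s : List Int) : get_lds_alt s = aS s s.length := by
  have h := (stageB s s.length (le_refl _)).2
  simpa [get_lds_alt, List.take_length] using h

-- ===== VERDICT (by name: the statement is the Claim_ definition above) =====
lemma max?_cons_getD (x : Int) (t : List Int) (hx : 0 ≤ x) :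
    (PySem.List.max? (x :: t) (fun y => y)).getD 0 = (x :: t).foldl max 0 := by
  rw [PySem.List.max?_id_cons]
  simp [max_eq_right hx]

lemma aS_eq (s : List Int) (k : ℕ) : aS s k = ((List.range k).map (Dv s)).foldl max 0 := by
  rw [List.foldl_map]; rfl

theorem get_lds_spec : Claim_equal_get_lds := by
  intro s _ hpre
  unfold Spec_get_lds
  rw [getLdsA s hpre, getLdsB, dpl_eq_map, aS_eq]
  obtain ⟨m, hm⟩ : ∃ m, s.length = m + 1 := by
    cases s with
    | nil => exact absurd rfl hpre
    | cons a t => exact ⟨t.length, rfl⟩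
  rw [hm, List.range_succ_eq_map, List.map_cons]
  rw [max?_cons_getD _ _ (by have := dv_pos s 0; omega)]
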